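-- pv_equiv track=rewrite | github.com/dennis-kao/MendelianRNA-seq-DB | Analysis/AddJunctionsToDatabase.py | get_annotated_counts
-- ===== SOURCE A (Python) =====
-- def makeStartString(chrom, start):
-- 	return ''.join([chrom,':','START',':',start])
--
-- def makeStopString(chrom, stop):
-- 	return ''.join([chrom,':','STOP',':',stop])
--
-- def get_annotated_counts(spliceDict):
--
-- 	count_dict = {}
--
-- 	for junction in spliceDict:
--
-- 		chrom, start, stop = junction
--
-- 		startString = makeStartString(chrom, start)
-- 		stopString = makeStopString(chrom, stop)
--
-- 		if startString in count_dict: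
-- 			if count_dict[startString] < spliceDict[junction]:
-- 				count_dict[startString] = spliceDict[junction]
-- 		else:
-- 			count_dict[startString] = spliceDict[junction]
--
-- 		if stopString in count_dict:
-- 			if count_dict[stopString] < spliceDict[junction]:
-- 				count_dict[stopString] = spliceDict[junction]
-- 		else:
-- 			count_dict[stopString] = spliceDict[junction]
--
-- 	return count_dict
-- ===== SOURCE B (Python) =====
-- def get_annotated_counts(spliceDict):
-- 	groups = {}
-- 	for junction in spliceDict:
-- 		chrom, start, stop = junction
-- 		count = spliceDict[junction]
-- 		groups.setdefault(chrom + ':START:' + start, []).append(count)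
-- 		groups.setdefault(chrom + ':STOP:' + stop, []).append(count)
-- 	return {key: max(values) for key, values in groups.items()}
-- ===== Notes on version B (the rewrite author's own statement) =====
-- stated objective: simpler
-- what changed: Replaces the running maximum threaded through in/else branches inside the single pass by a two-pass group-by: one pass appends each junction's count to a per-endpoint list of candidates, then a dict comprehension reduces each list with max().
import Mathlib
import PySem

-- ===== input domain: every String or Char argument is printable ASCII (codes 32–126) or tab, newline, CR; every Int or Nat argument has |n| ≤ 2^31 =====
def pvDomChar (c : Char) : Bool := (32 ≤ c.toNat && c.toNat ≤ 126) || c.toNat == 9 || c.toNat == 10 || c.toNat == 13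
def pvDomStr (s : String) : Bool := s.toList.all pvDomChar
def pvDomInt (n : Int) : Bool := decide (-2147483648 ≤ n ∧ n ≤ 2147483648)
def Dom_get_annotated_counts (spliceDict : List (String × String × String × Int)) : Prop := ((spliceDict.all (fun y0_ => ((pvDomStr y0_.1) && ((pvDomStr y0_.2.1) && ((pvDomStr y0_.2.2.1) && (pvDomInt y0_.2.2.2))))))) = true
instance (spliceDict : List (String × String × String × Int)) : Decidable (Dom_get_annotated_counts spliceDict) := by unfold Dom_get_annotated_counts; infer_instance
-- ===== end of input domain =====

-- B replaces A's running maximum threaded through in/else branches by a two-pass group-by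
-- (append every count to a per-endpoint bucket, then take max of each bucket); objective: simpler.

-- ===== PORT A =====
def pvMakeStartString (chrom start : String) : String :=
  PySem.Str.join "" [chrom, ":", "START", ":", start]

def pvMakeStopString (chrom stop : String) : String :=
  PySem.Str.join "" [chrom, ":", "STOP", ":", stop]

-- the body of A's `for junction in spliceDict` loop; `spliceDict[junction]` is the entry's
-- own value (a Python dict has unique keys, so the lookup returns the iterated entry's value)
def pvLoopBodyA (count_dict : PySem.Dict String Int)
    (junction : String × String × String × Int) : PySem.Dict String Int :=
  let chrom := junction.1
  let start := junction.2.1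
  let stop := junction.2.2.1
  let startString := pvMakeStartString chrom start
  let stopString := pvMakeStopString chrom stop
  let v := junction.2.2.2
  let count_dict :=
    if count_dict.contains startString then
      if count_dict.getD startString 0 < v then count_dict.insert startString v else count_dict
    else count_dict.insert startString v
  if count_dict.contains stopString then
    if count_dict.getD stopString 0 < v then count_dict.insert stopString v else count_dict
  else count_dict.insert stopString v

def get_annotated_counts (spliceDict : List (String × String × String × Int)) : List (String × Int) :=
  (spliceDict.foldl pvLoopBodyA PySem.Dict.empty).items

-- ===== PORT B =====
-- the body of B's loop: groups.setdefault(key, []).append(count) is d[key] = d.get(key, []) + [count]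
def pvLoopBodyB (groups : PySem.Dict String (List Int))
    (junction : String × String × String × Int) : PySem.Dict String (List Int) :=
  let count := junction.2.2.2
  let groups := groups.modify (junction.1 ++ ":START:" ++ junction.2.1) [] (· ++ [count])
  groups.modify (junction.1 ++ ":STOP:" ++ junction.2.2.1) [] (· ++ [count])

def get_annotated_counts_alt (spliceDict : List (String × String × String × Int)) : List (String × Int) :=
  let groups := spliceDict.foldl pvLoopBodyB PySem.Dict.empty
  groups.items.map (fun kv => (kv.1, (PySem.List.max? kv.2 (fun y => y)).getD 0))

-- ===== PRECONDITION & SPEC =====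
def Spec_get_annotated_counts (spliceDict : List (String × String × String × Int)) (out : List (String × Int)) : Prop := out = get_annotated_counts_alt spliceDict
instance (spliceDict : List (String × String × String × Int)) (out : List (String × Int)) : Decidable (Spec_get_annotated_counts spliceDict out) := by unfold Spec_get_annotated_counts; infer_instance

-- ===== CLAIM (what is proved, stated in full; the proofs are below) =====
def Claim_equal_get_annotated_counts : Prop := ∀ (spliceDict : List (String × String × String × Int)), Dom_get_annotated_counts spliceDict → Spec_get_annotated_counts spliceDict (get_annotated_counts spliceDict)

-- ===== LEMMAS AND PROOFS =====

-- one max-update step of A, on a single (key, value) pair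
def pvStepA (cd : PySem.Dict String Int) (p : String × Int) : PySem.Dict String Int :=
  if cd.contains p.1 then
    if cd.getD p.1 0 < p.2 then cd.insert p.1 p.2 else cd
  else cd.insert p.1 p.2

-- one bucket-append step of B, on a single (key, value) pair
def pvStepB (g : PySem.Dict String (List Int)) (p : String × Int) : PySem.Dict String (List Int) :=
  g.insert p.1 (g.getD p.1 [] ++ [p.2])

-- the flat stream of (endpoint key, count) pairs both loops process
def pvPairs (sd : List (String × String × String × Int)) : List (String × Int) :=
  sd.flatMap (fun j => [(j.1 ++ ":START:" ++ j.2.1, j.2.2.2), (j.1 ++ ":STOP:" ++ j.2.2.1, j.2.2.2)])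

-- B's reduction of a bucket
def pvMx (l : List Int) : Int := (PySem.List.max? l (fun y => y)).getD 0

lemma pv_mkStart (c s : String) : pvMakeStartString c s = c ++ ":START:" ++ s := by
  rw [← String.toList_inj]
  simp [pvMakeStartString, PySem.Str.join, PySem.Chars.join, List.intercalate]

lemma pv_mkStop (c s : String) : pvMakeStopString c s = c ++ ":STOP:" ++ s := by
  rw [← String.toList_inj]
  simp [pvMakeStopString, PySem.Str.join, PySem.Chars.join, List.intercalate]

lemma pv_modify_eq (g : PySem.Dict String (List Int)) (k : String) (v : Int) :
    g.modify k [] (· ++ [v]) = g.insert k (g.getD k [] ++ [v]) := by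
  simp [PySem.Dict.modify, PySem.Dict.insert, PySem.Dict.getD]

lemma pv_bodyA (cd : PySem.Dict String Int) (j : String × String × String × Int) :
    pvLoopBodyA cd j =
      pvStepA (pvStepA cd (j.1 ++ ":START:" ++ j.2.1, j.2.2.2)) (j.1 ++ ":STOP:" ++ j.2.2.1, j.2.2.2) := by
  simp only [pvLoopBodyA, pvStepA, pv_mkStart, pv_mkStop]

lemma pv_bodyB (g : PySem.Dict String (List Int)) (j : String × String × String × Int) :
    pvLoopBodyB g j =
      pvStepB (pvStepB g (j.1 ++ ":START:" ++ j.2.1, j.2.2.2)) (j.1 ++ ":STOP:" ++ j.2.2.1, j.2.2.2) := by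
  simp only [pvLoopBodyB, pvStepB, pv_modify_eq]

lemma pv_foldA (sd : List (String × String × String × Int)) :
    ∀ cd, sd.foldl pvLoopBodyA cd = (pvPairs sd).foldl pvStepA cd := by
  induction sd with
  | nil => intro cd; simp [pvPairs]
  | cons j t ih =>
      intro cd
      simp only [List.foldl_cons, pvPairs, List.flatMap_cons, List.foldl_append, List.foldl_cons,
        List.foldl_nil, pv_bodyA, ih, pvPairs]

lemma pv_foldB (sd : List (String × String × String × Int)) :
    ∀ g, sd.foldl pvLoopBodyB g = (pvPairs sd).foldl pvStepB g := by
  induction sd with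
  | nil => intro g; simp [pvPairs]
  | cons j t ih =>
      intro g
      simp only [List.foldl_cons, pvPairs, List.flatMap_cons, List.foldl_append, List.foldl_cons,
        List.foldl_nil, pv_bodyB, ih, pvPairs]

lemma pvMx_single (v : Int) : pvMx [v] = v := by
  simp [pvMx, PySem.List.max?_id_cons]

lemma pvMx_append (l : List Int) (v : Int) (h : l ≠ []) : pvMx (l ++ [v]) = max (pvMx l) v := by
  cases l with
  | nil => exact absurd rfl h
  | cons x t => simp [pvMx, PySem.List.max?_id_cons, List.foldl_append]

-- the simulation invariant: A's count_dict is B's groups with every bucket reduced by max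
lemma pv_sim (L : List (String × Int)) :
    ∀ (g : PySem.Dict String (List Int)) (cd : PySem.Dict String Int),
      cd.items = g.items.map (fun kv => (kv.1, pvMx kv.2)) →
      g.keys.Nodup →
      (∀ kv ∈ g.items, kv.2 ≠ []) →
      (L.foldl pvStepA cd).items = (L.foldl pvStepB g).items.map (fun kv => (kv.1, pvMx kv.2)) := by
  induction L with
  | nil => intro g cd h _ _; simpa using h
  | cons p t ih =>
    intro g cd hitems hnd hne
    have hkeyscd : cd.keys = cd.items.map Prod.fst := rfl
    have hkeysg : g.keys = g.items.map Prod.fst := rfl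
    have hkeys : cd.keys = g.keys := by
      rw [hkeyscd, hkeysg, hitems, List.map_map]
      exact List.map_congr_left (fun kv _ => rfl)
    have hndcd : cd.keys.Nodup := hkeys ▸ hnd
    have hcont : cd.contains p.1 = g.contains p.1 := by
      rw [PySem.Dict.contains_eq_decide_mem_keys, PySem.Dict.contains_eq_decide_mem_keys, hkeys]
    rw [List.foldl_cons, List.foldl_cons]
    by_cases hc : g.contains p.1 = true
    · -- the endpoint key is already present: A keeps a running max, B appends to the bucket
      have hcontcd : cd.contains p.1 = true := hcont.trans hc
      have hkmem : p.1 ∈ g.items.map Prod.fst := by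
        rw [← hkeysg]; exact (PySem.Dict.contains_iff_mem_keys g p.1).mp hc
      obtain ⟨kv0, hkv0, hfst0⟩ := List.mem_map.mp hkmem
      obtain ⟨k0, L0⟩ := kv0
      cases hfst0
      have hL0ne : L0 ≠ [] := hne _ hkv0
      have hgetg : g.getD p.1 [] = L0 := PySem.Dict.getD_of_mem_items g hkv0 hnd []
      have hmemcd : (p.1, pvMx L0) ∈ cd.items := by
        rw [hitems]; exact List.mem_map.mpr ⟨(p.1, L0), hkv0, rfl⟩
      have hgetcd : cd.getD p.1 0 = pvMx L0 := PySem.Dict.getD_of_mem_items cd hmemcd hndcd 0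
      have hstepB : pvStepB g p = g.insert p.1 (L0 ++ [p.2]) := by rw [pvStepB, hgetg]
      have hndB : (pvStepB g p).keys.Nodup := by
        rw [hstepB]; exact PySem.Dict.nodup_keys_insert g _ _ hnd
      have hneB : ∀ kv ∈ (pvStepB g p).items, kv.2 ≠ [] := by
        rw [hstepB]
        intro kv hkv
        rcases (PySem.Dict.mem_items_insert g _ _ kv).mp hkv with h1 | ⟨h2, _⟩
        · rw [h1]; simp
        · exact hne _ h2
      by_cases hlt : cd.getD p.1 0 < p.2
      · have hlt' : pvMx L0 < p.2 := hgetcd ▸ hlt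
        have hstepA : pvStepA cd p = cd.insert p.1 p.2 := by
          simp [pvStepA, hcontcd, hlt]
        apply ih
        · rw [hstepA, hstepB,
            PySem.Dict.items_insert_of_contains cd p.2 hcontcd,
            PySem.Dict.items_insert_of_contains g (L0 ++ [p.2]) hc, hitems,
            List.map_map, List.map_map]
          apply List.map_congr_left
          intro kv _
          by_cases hk : kv.1 = p.1
          · simp [Function.comp, hk, pvMx_append L0 p.2 hL0ne, max_eq_right (le_of_lt hlt')]
          · simp [Function.comp, hk]
        · exact hndB
        · exact hneB
      · have hle' : p.2 ≤ pvMx L0 := not_lt.mp (hgetcd ▸ hlt)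
        have hstepA : pvStepA cd p = cd := by
          simp [pvStepA, hcontcd, hlt]
        apply ih
        · rw [hstepA, hstepB,
            PySem.Dict.items_insert_of_contains g (L0 ++ [p.2]) hc, hitems, List.map_map]
          apply List.map_congr_left
          intro kv hkv
          by_cases hk : kv.1 = p.1
          · have hkv' : (p.1, kv.2) ∈ g.items := by
              obtain ⟨a, b⟩ := kv; cases hk; exact hkv
            have h2 : g.getD p.1 [] = kv.2 := PySem.Dict.getD_of_mem_items g hkv' hnd []
            have hL0 : kv.2 = L0 := by rw [← h2, hgetg]
            simp [Function.comp, hk, hL0, pvMx_append L0 p.2 hL0ne, max_eq_left hle']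
          · simp [Function.comp, hk]
        · exact hndB
        · exact hneB
    · -- fresh endpoint key: A inserts the value, B opens a one-element bucket
      have hcg : g.contains p.1 = false := by simpa using hc
      have hcontcd : cd.contains p.1 = false := by rw [hcont]; exact hcg
      have hstepA : pvStepA cd p = cd.insert p.1 p.2 := by
        simp [pvStepA, hcontcd]
      have hgetg : g.getD p.1 [] = [] := PySem.Dict.getD_of_not_contains g [] hcg
      have hstepB : pvStepB g p = g.insert p.1 [p.2] := by rw [pvStepB, hgetg]; rfl
      apply ih
      · rw [hstepA, hstepB,
          PySem.Dict.items_insert_of_not_contains cd p.2 hcontcd,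
          PySem.Dict.items_insert_of_not_contains g [p.2] hcg, hitems, List.map_append]
        simp [pvMx_single]
      · rw [hstepB]; exact PySem.Dict.nodup_keys_insert g _ _ hnd
      · rw [hstepB]
        intro kv hkv
        rcases (PySem.Dict.mem_items_insert g _ _ kv).mp hkv with h1 | ⟨h2, _⟩
        · rw [h1]; simp
        · exact hne _ h2

-- ===== VERDICT (by name: the statement is the Claim_ definition above) =====
theorem get_annotated_counts_spec : Claim_equal_get_annotated_counts := by
  intro sd _
  unfold Spec_get_annotated_counts get_annotated_counts get_annotated_counts_alt
  rw [pv_foldA, pv_foldB]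
  exact pv_sim (pvPairs sd) PySem.Dict.empty PySem.Dict.empty rfl
    (PySem.Dict.nodup_keys_empty) (by intro kv hkv; simp [PySem.Dict.empty] at hkv)
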